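-- pv_equiv track=rewrite | github.com/libharmo/libharmo.github.io | code/py/icfctclb/trimPathUtil.py | trimPathSub
-- ===== SOURCE A (Python) =====
-- def trimPathSub(path):
--     path = path.replace("\\","/")
--     data = path.split("/")
--     a = set()
--     for i in range(0,len(data)):
--         temp = data[i]
--         if i!=0 and ".." == temp and data[i-1]!="..":
--             a.add(i-1)
--             a.add(i)
--         if i!=0 and "." == temp:
--             a.add(i)
--     res = ""
--     for i in range(0,len(data)):
--         if data[i] =='':
--             continue
--         if i in a:
--             continue
--         else:
--             res+=data[i]
--             res+="/"
--     if path.endswith("/"):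
--         return res
--     return res[0:-1]
-- ===== SOURCE B (Python) =====
-- def trimPathSub(path):
--     path = path.replace("\\", "/")
--     data = path.split("/")
--     n = len(data)
--     kept = []
--     for i in range(n):
--         seg = data[i]
--         if seg == "":
--             continue
--         if seg == "." and i != 0:
--             continue
--         if seg == ".." and i != 0 and data[i - 1] != "..":
--             continue
--         if i + 1 < n and data[i + 1] == ".." and seg != "..":
--             continue
--         kept.append(seg)
--     res = "/".join(kept)
--     if path.endswith("/"):
--         return res + "/" if kept else ""
--     return res
-- ===== Notes on version B (the rewrite author's own statement) =====
-- stated objective: simpler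
-- what changed: A marks indices to delete in a set with two separate loops and then filters by set membership while concatenating with trailing slashes; B does a single pass over the split segments with a one-segment lookahead at i+1, collects the kept segments in a list and joins them, handling the trailing slash at the end.
import Mathlib
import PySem

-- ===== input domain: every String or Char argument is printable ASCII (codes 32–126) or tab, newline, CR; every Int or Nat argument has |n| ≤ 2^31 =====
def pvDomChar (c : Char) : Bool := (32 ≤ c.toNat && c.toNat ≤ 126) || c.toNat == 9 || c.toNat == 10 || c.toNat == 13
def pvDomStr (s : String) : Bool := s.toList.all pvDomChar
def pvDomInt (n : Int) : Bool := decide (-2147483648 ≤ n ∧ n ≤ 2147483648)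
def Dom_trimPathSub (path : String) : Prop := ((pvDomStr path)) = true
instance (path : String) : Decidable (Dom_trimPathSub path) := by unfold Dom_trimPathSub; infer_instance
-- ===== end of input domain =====

-- B replaces A's mark-indices-in-a-set-then-filter two-loop scheme by a single pass with
-- a one-segment lookahead that collects the kept segments and joins them (objective: simpler).

-- ===== PORT A =====
-- A-side helpers: the bodies of A's two loops
def pvA_markStep (data : List String) (a : PySem.Set Int) (i : Int) : PySem.Set Int :=
  let temp := PySem.List.pyGetD data i ""
  let a := if i ≠ 0 ∧ temp = ".." ∧ PySem.List.pyGetD data (i - 1) "" ≠ ".." then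
             PySem.Set.add (PySem.Set.add a (i - 1)) i
           else a
  if i ≠ 0 ∧ temp = "." then PySem.Set.add a i else a

def pvA_resStep (data : List String) (a : PySem.Set Int) (res : List Char) (i : Int) : List Char :=
  if PySem.List.pyGetD data i "" = "" then res
  else if PySem.Set.contains a i then res
  else res ++ (PySem.List.pyGetD data i "").toList ++ ['/']

def trimPathSub (path : String) : String :=
  let path := PySem.Str.replace path "\\" "/"
  let data := (PySem.Str.split? path "/").getD []
  let a := (PySem.List.pyRange 0 (data.length : Int) 1).foldl (pvA_markStep data) PySem.Set.empty
  let res := (PySem.List.pyRange 0 (data.length : Int) 1).foldl (pvA_resStep data a) []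
  if PySem.Str.endswith path "/" then String.ofList res
  else String.ofList (PySem.List.slice res none (some (-1)))

-- ===== PORT B =====
-- B-side helper: the body of B's single loop (lookahead at i+1)
def pvB_keepStep (data : List String) (n : Int) (kept : List String) (i : Int) : List String :=
  let seg := PySem.List.pyGetD data i ""
  if seg = "" then kept
  else if seg = "." ∧ i ≠ 0 then kept
  else if seg = ".." ∧ i ≠ 0 ∧ PySem.List.pyGetD data (i - 1) "" ≠ ".." then kept
  else if i + 1 < n ∧ PySem.List.pyGetD data (i + 1) "" = ".." ∧ seg ≠ ".." then kept
  else kept ++ [seg]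

def trimPathSub_alt (path : String) : String :=
  let path := PySem.Str.replace path "\\" "/"
  let data := (PySem.Str.split? path "/").getD []
  let n : Int := data.length
  let kept := (PySem.List.pyRange 0 n 1).foldl (pvB_keepStep data n) []
  let res := PySem.Str.join "/" kept
  if PySem.Str.endswith path "/" then (if kept ≠ [] then res ++ "/" else "")
  else res

-- ===== PRECONDITION & SPEC =====
def Spec_trimPathSub (path : String) (out : String) : Prop := out = trimPathSub_alt path
instance (path : String) (out : String) : Decidable (Spec_trimPathSub path out) := by unfold Spec_trimPathSub; infer_instance

-- ===== CLAIM (what is proved, stated in full; the proofs are below) =====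
def Claim_equal_trimPathSub : Prop := ∀ (path : String), Dom_trimPathSub path → Spec_trimPathSub path (trimPathSub path)

-- ===== LEMMAS AND PROOFS =====

-- segment at (in-range) index i
def pvSg (data : List String) (i : Int) : String := PySem.List.pyGetD data i ""

-- B's combined drop condition, as a Bool
def pvDrop (data : List String) (i : Int) : Bool :=
  (pvSg data i == "") || (pvSg data i == "." && i != 0)
    || (pvSg data i == ".." && i != 0 && pvSg data (i - 1) != "..")
    || (decide (i + 1 < (data.length : Int)) && pvSg data (i + 1) == ".." && pvSg data i != "..")

-- what A's marking loop adds at step i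
def pvAdds (data : List String) (i j : Int) : Prop :=
  ((i ≠ 0 ∧ pvSg data i = ".." ∧ pvSg data (i - 1) ≠ "..") ∧ (j = i - 1 ∨ j = i))
    ∨ ((i ≠ 0 ∧ pvSg data i = ".") ∧ j = i)

-- A's mark set, characterized
def pvMark (data : List String) (j : Int) : Prop :=
  (j ≠ 0 ∧ pvSg data j = ".")
    ∨ (j ≠ 0 ∧ pvSg data j = ".." ∧ pvSg data (j - 1) ≠ "..")
    ∨ (j + 1 < (data.length : Int) ∧ pvSg data (j + 1) = ".." ∧ pvSg data j ≠ "..")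

theorem pvSg_of_oob (data : List String) {j : Int} (hj : 0 ≤ j)
    (hge : (data.length : Int) ≤ j) : pvSg data j = "" := by
  rw [pvSg, PySem.List.pyGetD_of_nonneg data "" hj]
  exact List.getD_eq_default data "" (by omega)

theorem pvA_markStep_mem (data : List String) (s : PySem.Set Int) (i j : Int) :
    j ∈ pvA_markStep data s i ↔ j ∈ s ∨ pvAdds data i j := by
  simp only [pvA_markStep, pvAdds, pvSg]
  split_ifs <;> simp [PySem.Set.mem_add] <;> tauto

theorem pvA_fold_mem (data : List String) (l : List Int) (s : PySem.Set Int) (j : Int) :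
    j ∈ l.foldl (pvA_markStep data) s ↔ j ∈ s ∨ ∃ i ∈ l, pvAdds data i j := by
  induction l generalizing s with
  | nil => simp
  | cons i l ih => rw [List.foldl_cons, ih, pvA_markStep_mem]; simp; tauto

theorem pvMark_iff (data : List String) (j : Int) (hj : 0 ≤ j) :
    (∃ i ∈ PySem.List.pyRange 0 (data.length : Int) 1, pvAdds data i j) ↔ pvMark data j := by
  constructor
  · rintro ⟨i, hi, h⟩
    rw [PySem.List.mem_pyRange_one] at hi
    rcases h with ⟨⟨hi0, hdd, hprev⟩, hj' | hj'⟩ | ⟨⟨hi0, hd⟩, hj'⟩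
    · subst hj'
      refine Or.inr (Or.inr ⟨by omega, ?_, ?_⟩)
      · rw [show i - 1 + 1 = i by omega]; exact hdd
      · exact hprev
    · subst hj'; exact Or.inr (Or.inl ⟨hi0, hdd, hprev⟩)
    · subst hj'; exact Or.inl ⟨hi0, hd⟩
  · rintro (⟨h0, hd⟩ | ⟨h0, hdd, hp⟩ | ⟨hlt, hnx, hs⟩)
    · have hjlt : j < (data.length : Int) := by
        by_contra hge
        rw [pvSg_of_oob data hj (by omega)] at hd
        exact absurd hd (by decide)
      exact ⟨j, by rw [PySem.List.mem_pyRange_one]; omega, Or.inr ⟨⟨h0, hd⟩, rfl⟩⟩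
    · have hjlt : j < (data.length : Int) := by
        by_contra hge
        rw [pvSg_of_oob data hj (by omega)] at hdd
        exact absurd hdd (by decide)
      exact ⟨j, by rw [PySem.List.mem_pyRange_one]; omega, Or.inl ⟨⟨h0, hdd, hp⟩, Or.inr rfl⟩⟩
    · refine ⟨j + 1, by rw [PySem.List.mem_pyRange_one]; omega,
        Or.inl ⟨⟨by omega, hnx, ?_⟩, Or.inl (by omega)⟩⟩
      rw [show j + 1 - 1 = j by omega]; exact hs

-- the drop condition equals "empty or marked"
theorem pvDrop_iff (data : List String) (j : Int) :
    pvDrop data j = true ↔ (pvSg data j = "" ∨ pvMark data j) := by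
  simp only [pvDrop, pvMark]
  simp
  tauto

theorem pvB_step_eq (data : List String) (kept : List String) (i : Int) :
    pvB_keepStep data (data.length : Int) kept i =
      if (!pvDrop data i) = true then kept ++ [pvSg data i] else kept := by
  have hiff := pvDrop_iff data i
  simp only [pvB_keepStep]
  by_cases h1 : PySem.List.pyGetD data i "" = ""
  · have hd : pvDrop data i = true := hiff.mpr (Or.inl (by simpa [pvSg] using h1))
    simp [h1, hd]
  · by_cases h2 : PySem.List.pyGetD data i "" = "." ∧ i ≠ 0
    · have hd : pvDrop data i = true :=
        hiff.mpr (Or.inr (Or.inl ⟨h2.2, by simpa [pvSg] using h2.1⟩))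
      simp [h2, hd]
    · by_cases h3 : PySem.List.pyGetD data i "" = ".." ∧ i ≠ 0 ∧ PySem.List.pyGetD data (i - 1) "" ≠ ".."
      · have hd : pvDrop data i = true :=
          hiff.mpr (Or.inr (Or.inr (Or.inl ⟨h3.2.1, by simpa [pvSg] using h3.1, by simpa [pvSg] using h3.2.2⟩)))
        simp [h3, hd]
      · by_cases h4 : i + 1 < (data.length : Int) ∧ PySem.List.pyGetD data (i + 1) "" = ".." ∧ PySem.List.pyGetD data i "" ≠ ".."
        · have hd : pvDrop data i = true :=
            hiff.mpr (Or.inr (Or.inr (Or.inr ⟨h4.1, by simpa [pvSg] using h4.2.1, by simpa [pvSg] using h4.2.2⟩)))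
          simp [h1, h2, h4, hd]
        · have hd : pvDrop data i = false := by
            cases h : pvDrop data i
            · rfl
            · exfalso
              rcases hiff.mp h with h' | h'
              · exact h1 (by simpa [pvSg] using h')
              · simp only [pvMark, pvSg] at h'
                tauto
          simp [h1, h2, h3, h4, hd, pvSg]

theorem pvB_fold_eq (data : List String) (l : List Int) (acc : List String) :
    l.foldl (pvB_keepStep data (data.length : Int)) acc =
      acc ++ (l.filter (fun i => !pvDrop data i)).map (pvSg data) := by
  have hfun : pvB_keepStep data (data.length : Int) =
      fun acc i => if (!pvDrop data i) = true then acc ++ [pvSg data i] else acc := by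
    funext acc i; exact pvB_step_eq data acc i
  rw [hfun, PySem.List.foldl_append_if]

-- the if-guarded chunk A appends at index i
def pvChunk (data : List String) (i : Int) : List Char :=
  if (!pvDrop data i) = true then (pvSg data i).toList ++ ['/'] else []

theorem pvA_res_eq (data : List String) :
    (PySem.List.pyRange 0 (data.length : Int) 1).foldl
        (pvA_resStep data
          ((PySem.List.pyRange 0 (data.length : Int) 1).foldl (pvA_markStep data) PySem.Set.empty)) [] =
      (PySem.List.pyRange 0 (data.length : Int) 1).flatMap (pvChunk data) := by
  rw [PySem.List.foldl_congr_mem _ _ (fun res i => res ++ pvChunk data i) []]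
  · rw [PySem.List.foldl_append_eq_flatMap]; simp
  · intro res i hi
    have hi' := PySem.List.mem_pyRange_one.mp hi
    have hmem : (PySem.Set.contains
        ((PySem.List.pyRange 0 (data.length : Int) 1).foldl (pvA_markStep data) PySem.Set.empty) i
          = true) ↔ pvMark data i := by
      rw [PySem.Set.contains_iff, pvA_fold_mem]
      constructor
      · rintro (h | h)
        · simp [PySem.Set.empty] at h
        · exact (pvMark_iff data i hi'.1).mp h
      · intro h; exact Or.inr ((pvMark_iff data i hi'.1).mpr h)
    simp only [pvA_resStep, pvChunk]
    by_cases he : PySem.List.pyGetD data i "" = ""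
    · have hd : pvDrop data i = true := (pvDrop_iff data i).mpr (Or.inl (by simpa [pvSg] using he))
      rw [if_pos he, hd]
      simp
    · by_cases hm : pvMark data i
      · have hd : pvDrop data i = true := (pvDrop_iff data i).mpr (Or.inr hm)
        have hc := hmem.mpr hm
        rw [if_neg he, if_pos hc, hd]
        simp
      · have hd : pvDrop data i = false := by
          cases h : pvDrop data i
          · rfl
          · rcases (pvDrop_iff data i).mp h with h' | h'
            · exact absurd (by simpa [pvSg] using h') he
            · exact absurd h' hm
        have hc : ¬ ((PySem.Set.contains
            ((PySem.List.pyRange 0 (data.length : Int) 1).foldl (pvA_markStep data) PySem.Set.empty) i)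
              = true) := fun h => hm (hmem.mp h)
        rw [if_neg he, if_neg hc, hd]
        simp [pvSg, List.append_assoc]

-- gluing: the '/'-terminated chunks flatten to the '/'-join plus a final '/'
theorem pvGlue (kept : List String) :
    kept.flatMap (fun s => s.toList ++ ['/']) =
      (if kept = [] then [] else PySem.Chars.join ['/'] (kept.map String.toList) ++ ['/']) := by
  induction kept with
  | nil => simp
  | cons c L ih =>
    cases L with
    | nil => simp [PySem.Chars.join_singleton]
    | cons d L =>
      rw [List.flatMap_cons, ih, if_neg (List.cons_ne_nil d L),
        if_neg (List.cons_ne_nil c (d :: L))]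
      simp [PySem.Chars.join_cons_cons]

theorem pvFlatMap_filter (data : List String) (l : List Int) :
    l.flatMap (pvChunk data) =
      ((l.filter (fun i => !pvDrop data i)).map (pvSg data)).flatMap (fun s => s.toList ++ ['/']) := by
  induction l with
  | nil => simp
  | cons i l ih =>
    by_cases h : pvDrop data i <;> simp [pvChunk, h, ih]

-- join over kept, on the character level
theorem pvJoin_toList (kept : List String) :
    (PySem.Str.join "/" kept).toList = PySem.Chars.join ['/'] (kept.map String.toList) := by
  rw [PySem.Str.toList_join]
  rfl

-- the two trailing-slash finishes, over an arbitrary kept list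
theorem pvFinish_slash (kept : List String) :
    String.ofList (kept.flatMap (fun s => s.toList ++ ['/'])) =
      (if kept ≠ [] then PySem.Str.join "/" kept ++ "/" else "") := by
  rw [pvGlue]
  by_cases hk : kept = []
  · rw [if_pos hk, if_neg (by simp [hk])]
  · rw [if_neg hk, if_pos hk]
    rw [← String.ofList_toList (s := PySem.Str.join "/" kept ++ "/"),
      String.toList_append, pvJoin_toList]
    rfl

theorem pvFinish_noslash (kept : List String) :
    String.ofList ((kept.flatMap (fun s => s.toList ++ ['/'])).dropLast) =
      PySem.Str.join "/" kept := by
  rw [pvGlue]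
  by_cases hk : kept = []
  · rw [if_pos hk, hk]
    rfl
  · rw [if_neg hk, List.dropLast_concat, ← pvJoin_toList, String.ofList_toList]

-- ===== VERDICT (by name: the statement is the Claim_ definition above) =====
theorem trimPathSub_spec : Claim_equal_trimPathSub := by
  intro path _
  unfold Spec_trimPathSub trimPathSub trimPathSub_alt
  dsimp only
  rw [pvA_res_eq, pvB_fold_eq, List.nil_append, pvFlatMap_filter, PySem.List.slice_to_neg_one]
  by_cases he : PySem.Str.endswith (PySem.Str.replace path "\\" "/") "/" = true
  · rw [if_pos he, if_pos he, pvFinish_slash]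
  · rw [if_neg he, if_neg he, pvFinish_noslash]
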